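-- pv_equiv track=rewrite | github.com/jonathan-lemos/quicc | main.py | __epsilon_iter
-- ===== SOURCE A (Python) =====
-- import itertools
-- from typing import Callable, Deque, Dict, Iterable, List, Pattern, Sequence, Set, Tuple, TypeVar, Union
--
-- def __epsilon_iter(l: Tuple[str], s: str) -> List[Tuple[str]]:
--     # power set bit strings. length = occurences in S
--     # 0 represents "not in the set", 1 represents "in the set"
--     bitstrings = ["".join(seq) for seq in itertools.product("01", repeat=l.count(s))]
--     output = []
--     for bs in bitstrings:
--         tmp = []
--         ctr = 0
--         # for each token in the production
--         for c in l:
--             # if the token is not our iterator, append it to tmp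
--             if c != s:
--                 tmp.append(c)
--             # otherwise only append it if the bitstring at this char is a 0
--             else:
--                 if bs[ctr] == "1":
--                     tmp.append(c)
--                 ctr += 1
--         # if there's nothing in our tmp, append epsilon
--         if len(tmp) == 0:
--             output.append(("#",))
--         # otherwise append tmp
--         else:
--             output.append(tuple(tmp))
--     return output
-- ===== SOURCE B (Python) =====
-- def __epsilon_iter(l, s):
--     # Incremental construction: one pass over l, doubling partials at each
--     # occurrence of s (drop branch before keep branch), instead of
--     # enumerating bitstrings and rescanning l for each of them.
--     parts = [[]]
--     for c in l:
--         if c != s: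
--             for p in parts:
--                 p.append(c)
--         else:
--             parts = [q for p in parts for q in (p, p + [c])]
--     return [tuple(p) if p else ("#",) for p in parts]
-- ===== Notes on version B (the rewrite author's own statement) =====
-- stated objective: alternative
-- what changed: Replaces the bitstring power-set enumeration with its per-subset rescan of l by a single incremental pass over l that doubles the list of partial results (drop branch before keep branch) at each occurrence of s.
import Mathlib
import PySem

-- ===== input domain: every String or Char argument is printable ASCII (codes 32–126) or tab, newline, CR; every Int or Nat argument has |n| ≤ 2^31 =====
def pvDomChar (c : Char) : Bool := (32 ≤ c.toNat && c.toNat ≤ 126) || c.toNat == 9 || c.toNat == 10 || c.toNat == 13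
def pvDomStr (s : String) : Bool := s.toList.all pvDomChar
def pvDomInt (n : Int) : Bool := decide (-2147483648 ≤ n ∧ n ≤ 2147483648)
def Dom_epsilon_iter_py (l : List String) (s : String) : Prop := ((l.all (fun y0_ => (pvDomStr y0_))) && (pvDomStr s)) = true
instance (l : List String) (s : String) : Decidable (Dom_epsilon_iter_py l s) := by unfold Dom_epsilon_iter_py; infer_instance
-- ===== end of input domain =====

-- B replaces A's bitstring enumeration + per-subset rescan by one incremental pass
-- that doubles the partial list at each occurrence of s (objective: alternative).


-- ===== PORT A =====
-- itertools.product("01", repeat=k): all length-k strings over {'0','1'},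
-- first position varies slowest (lexicographic order).
def pvBitstrings : Nat → List (List Char)
  | 0 => [[]]
  | n + 1 => (pvBitstrings n).map ('0' :: ·) ++ (pvBitstrings n).map ('1' :: ·)

def epsilon_iter_py (l : List String) (s : String) : List (List String) :=
  let bitstrings := pvBitstrings (PySem.List.count l s)
  -- the output loop 'for bs in bitstrings: … output.append(…)' as a map
  bitstrings.map (fun bs =>
    -- inner loop over l with state (tmp, ctr); bs[ctr] is always in range
    -- (ctr < l.count s = bs.length on every reachable state), so getD's
    -- default '0' is never read.
    let res := l.foldl (fun (st : List String × Nat) c =>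
      if c ≠ s then (st.1 ++ [c], st.2)
      else if bs.getD st.2 '0' == '1' then (st.1 ++ [c], st.2 + 1)
      else (st.1, st.2 + 1)) ([], 0)
    if res.1 = [] then ["#"] else res.1)

-- ===== PORT B =====
def epsilon_iter_py_alt (l : List String) (s : String) : List (List String) :=
  let parts := l.foldl (fun (parts : List (List String)) c =>
    if c ≠ s then parts.map (fun p => p ++ [c])
    else parts.flatMap (fun p => [p, p ++ [c]])) [[]]
  parts.map (fun p => if p = [] then ["#"] else p)

-- ===== PRECONDITION & SPEC =====
def Spec_epsilon_iter_py (l : List String) (s : String) (out : List (List String)) : Prop := out = epsilon_iter_py_alt l s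
instance (l : List String) (s : String) (out : List (List String)) : Decidable (Spec_epsilon_iter_py l s out) := by unfold Spec_epsilon_iter_py; infer_instance

-- ===== CLAIM (what is proved, stated in full; the proofs are below) =====
def Claim_equal_epsilon_iter_py : Prop := ∀ (l : List String) (s : String), Dom_epsilon_iter_py l s → Spec_epsilon_iter_py l s (epsilon_iter_py l s)

-- ===== LEMMAS AND PROOFS =====

-- the subset of l selected by the bit list bs (consumed left-to-right at occurrences of s)
def pvSel (s : String) : List String → List Char → List String
  | [], _ => []
  | c :: rest, bs =>
    if c ≠ s then c :: pvSel s rest bs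
    else if bs.headD '0' == '1' then c :: pvSel s rest bs.tail
    else pvSel s rest bs.tail

theorem pvGetD_drop (bs : List Char) (n : Nat) : bs.getD n '0' = (bs.drop n).headD '0' := by
  induction bs generalizing n with
  | nil => simp [List.getD]
  | cons b bs ih =>
    cases n with
    | zero => simp [List.getD]
    | succ n => simp [List.getD]

-- A's inner loop computes pvSel, the counter acting as a drop offset into bs
theorem pvA_fold (s : String) (bs : List Char) (l : List String) (tmp : List String) (ctr : Nat) :
    l.foldl (fun (st : List String × Nat) c =>
      if c ≠ s then (st.1 ++ [c], st.2)
      else if bs.getD st.2 '0' == '1' then (st.1 ++ [c], st.2 + 1)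
      else (st.1, st.2 + 1)) (tmp, ctr)
    = (tmp ++ pvSel s l (bs.drop ctr), ctr + PySem.List.count l s) := by
  induction l generalizing tmp ctr with
  | nil => simp [pvSel, PySem.List.count]
  | cons c rest ih =>
    rw [List.foldl_cons]
    by_cases hc : c = s
    · subst hc
      rw [if_neg (by simp), show bs.getD ctr '0' = (bs.drop ctr).headD '0' from pvGetD_drop bs ctr]
      by_cases hb : ((bs.drop ctr).headD '0' == '1') = true
      · rw [if_pos hb, ih]
        simp only [pvSel, List.tail_drop, PySem.List.count, List.count_cons, Prod.mk.injEq]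
        rw [if_neg (by simp : ¬(c ≠ c)), if_pos hb]
        exact ⟨by simp [List.append_assoc], by simp; omega⟩
      · rw [if_neg hb, ih]
        simp only [pvSel, List.tail_drop, PySem.List.count, List.count_cons, Prod.mk.injEq]
        rw [if_neg (by simp : ¬(c ≠ c)), if_neg hb]
        exact ⟨by simp, by simp; omega⟩
    · rw [if_pos hc, ih]
      simp [pvSel, hc, PySem.List.count]

-- B's single pass expands to the bitstring enumeration
theorem pvB_fold (s : String) (l : List String) (parts : List (List String)) :
    l.foldl (fun (parts : List (List String)) c =>
      if c ≠ s then parts.map (fun p => p ++ [c])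
      else parts.flatMap (fun p => [p, p ++ [c]])) parts
    = parts.flatMap (fun p => (pvBitstrings (PySem.List.count l s)).map (fun bs => p ++ pvSel s l bs)) := by
  induction l generalizing parts with
  | nil => simp [pvBitstrings, PySem.List.count, pvSel]
  | cons c rest ih =>
    rw [List.foldl_cons]
    by_cases hc : c = s
    · subst hc
      rw [if_neg (by simp), ih, List.flatMap_assoc]
      have hcount : PySem.List.count (c :: rest) c = PySem.List.count rest c + 1 := by
        simp [PySem.List.count]
      rw [hcount]
      refine List.flatMap_congr (fun p _ => ?_)
      simp [pvBitstrings, pvSel, List.map_map, Function.comp_def, List.append_assoc]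
    · rw [if_pos hc, ih, List.flatMap_map]
      have hcount : PySem.List.count (c :: rest) s = PySem.List.count rest s := by
        simp [PySem.List.count, hc]
      rw [hcount]
      refine List.flatMap_congr (fun p _ => ?_)
      simp [pvSel, hc, List.append_assoc]

-- ===== VERDICT (by name: the statement is the Claim_ definition above) =====
theorem epsilon_iter_py_spec : Claim_equal_epsilon_iter_py := by
  intro l s _
  unfold Spec_epsilon_iter_py epsilon_iter_py epsilon_iter_py_alt
  rw [pvB_fold]
  simp only [List.flatMap_cons, List.flatMap_nil, List.append_nil, List.nil_append, List.map_map]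
  refine List.map_congr_left (fun bs _ => ?_)
  rw [pvA_fold]
  simp
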